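-- pv_equiv track=rewrite | github.com/cmdhertel/Aventurische-Namensschmiede | src/namegen/pdf_builder.py | summarize_region_abbrs
-- ===== SOURCE A (Python) =====
-- def derive_region_abbr(region: str, region_abbr: str | None = None) -> str:
--     """Return a stable three-letter abbreviation for a region."""
--     abbr = str(region_abbr or "").strip().upper()
--     if len(abbr) == 3:
--         return abbr
--     cleaned = "".join(ch for ch in region if ch.isalpha()).upper()
--     return cleaned[:3] if cleaned else "???"
--
-- def summarize_region_abbrs(entries: list[dict]) -> str:
--     """Return a comma-separated list of distinct region labels as Region (ABK)."""
--     region_labels = {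
--         (
--             f"{str(entry.get('region', '')).strip()} "
--             f"({derive_region_abbr(str(entry.get('region', '')), entry.get('region_abbr'))})"
--         )
--         for entry in entries
--         if entry.get("region")
--     }
--     return ", ".join(sorted(region_labels)) if region_labels else "–"
-- ===== SOURCE B (Python) =====
-- def derive_region_abbr(region: str, region_abbr: str | None = None) -> str:
--     """Return a stable three-letter abbreviation for a region."""
--     abbr = str(region_abbr or "").strip().upper()
--     if len(abbr) == 3:
--         return abbr
--     cleaned = "".join(ch for ch in region if ch.isalpha()).upper()
--     return cleaned[:3] if cleaned else "???"
--
-- def summarize_region_abbrs(entries: list[dict]) -> str: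
--     """Distinct labels in ascending order by repeated minimum extraction: no set,
--     no sort; each round scans for the smallest label strictly above the last one."""
--     labels = []
--     for entry in entries:
--         region = entry.get("region")
--         if region:
--             labels.append(
--                 f"{str(region).strip()} ({derive_region_abbr(str(region), entry.get('region_abbr'))})"
--             )
--     if not labels:
--         return "–"
--     out = []
--     prev = None
--     while True:
--         nxt = None
--         for lab in labels:
--             if (prev is None or lab > prev) and (nxt is None or lab < nxt):
--                 nxt = lab
--         if nxt is None:
--             break
--         out.append(nxt)
--         prev = nxt
--     return ", ".join(out)
-- ===== Notes on version B (the rewrite author's own statement) =====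
-- stated objective: alternative
-- what changed: B never sorts and never builds a set: it emits the distinct labels in ascending order by repeated minimum extraction, each round scanning the label list for the smallest label strictly greater than the last emitted one.
import Mathlib
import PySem

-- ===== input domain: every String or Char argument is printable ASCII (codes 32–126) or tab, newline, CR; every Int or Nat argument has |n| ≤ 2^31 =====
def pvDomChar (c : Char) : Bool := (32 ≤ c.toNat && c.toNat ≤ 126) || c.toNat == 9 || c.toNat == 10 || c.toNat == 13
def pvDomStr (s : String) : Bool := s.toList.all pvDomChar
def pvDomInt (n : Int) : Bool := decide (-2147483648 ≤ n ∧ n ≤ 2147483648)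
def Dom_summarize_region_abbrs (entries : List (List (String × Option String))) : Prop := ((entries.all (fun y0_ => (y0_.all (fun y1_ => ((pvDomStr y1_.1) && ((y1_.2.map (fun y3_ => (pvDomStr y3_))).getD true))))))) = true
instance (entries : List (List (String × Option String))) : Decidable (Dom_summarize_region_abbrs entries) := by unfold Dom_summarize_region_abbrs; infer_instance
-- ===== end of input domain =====

-- B emits the distinct labels in ascending order by repeated minimum extraction
-- (each round scans for the smallest label above the last emitted one) instead of
-- A's set-then-sort; objective: alternative algorithm, same result.

-- ===== PORT A =====
-- shared module helper, used by both Pythons unchanged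
def derive_region_abbr (region : String) (region_abbr : Option String) : String :=
  let abbr := PySem.Str.upper (PySem.Str.strip (region_abbr.getD ""))   -- str(region_abbr or "")
  if PySem.Str.len abbr = 3 then abbr
  else
    -- "".join(ch for ch in region if ch.isalpha()).upper() : per-char filter, exact on ASCII
    let cleaned := PySem.Str.upper (String.ofList (region.toList.filter PySem.Chars.isalpha))
    if cleaned ≠ "" then PySem.Str.slice cleaned none (some 3) else "???"

-- the set comprehension: fold over entries adding each label into a PySem.Set.
-- Under the truthiness guard entry.get('region') = some r with r ≠ "", so
-- str(entry.get('region','')) = r.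
def summarize_region_abbrs (entries : List (List (String × Option String))) : String :=
  let region_labels : PySem.Set String :=
    entries.foldl (fun s entry =>
      match (PySem.Dict.get? (PySem.Dict.mk entry) "region").getD none with
      | none => s
      | some r =>
        if r = "" then s
        else PySem.Set.add s
          (PySem.Str.strip r ++ " (" ++
            derive_region_abbr r ((PySem.Dict.get? (PySem.Dict.mk entry) "region_abbr").getD none) ++ ")"))
      PySem.Set.empty
  if region_labels = [] then "–"
  else PySem.Str.join ", " (PySem.List.sorted region_labels (fun x => x) false)

-- ===== PORT B =====
-- "(prev is None or lab > prev)" — true when prev is None, else the comparison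
def pvAbove (prev : Option String) (lab : String) : Bool :=
  prev.all (fun p => decide (p < lab))

-- the inner 'for lab in labels' scan computing the round's minimum candidate
def pvMinAbove (labels : List String) (prev : Option String) : Option String :=
  labels.foldl (fun nxt lab =>
    if pvAbove prev lab && nxt.all (fun n => decide (lab < n)) then some lab else nxt) none

-- the 'while True' loop; fuel = labels.length is a totality guard only (the loop
-- runs at most one round per distinct label, and distinct ≤ length)
def pvExtract (labels : List String) (prev : Option String) (fuel : Nat) : List String :=
  match fuel with
  | 0 => []
  | fuel + 1 =>
    match pvMinAbove labels prev with
    | none => []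
    | some m => m :: pvExtract labels (some m) fuel

def summarize_region_abbrs_alt (entries : List (List (String × Option String))) : String :=
  let labels : List String :=
    entries.foldl (fun acc entry =>
      match (PySem.Dict.get? (PySem.Dict.mk entry) "region").getD none with
      | none => acc
      | some r =>
        if r = "" then acc
        else acc ++
          [PySem.Str.strip r ++ " (" ++
            derive_region_abbr r ((PySem.Dict.get? (PySem.Dict.mk entry) "region_abbr").getD none) ++ ")"])
      []
  if labels = [] then "–"
  else PySem.Str.join ", " (pvExtract labels none labels.length)

-- ===== PRECONDITION & SPEC =====
def Spec_summarize_region_abbrs (entries : List (List (String × Option String))) (out : String) : Prop := out = summarize_region_abbrs_alt entries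
instance (entries : List (List (String × Option String))) (out : String) : Decidable (Spec_summarize_region_abbrs entries out) := by unfold Spec_summarize_region_abbrs; infer_instance

-- ===== CLAIM (what is proved, stated in full; the proofs are below) =====
def Claim_equal_summarize_region_abbrs : Prop := ∀ (entries : List (List (String × Option String))), Dom_summarize_region_abbrs entries → Spec_summarize_region_abbrs entries (summarize_region_abbrs entries)

-- ===== LEMMAS AND PROOFS =====

-- A's fold-into-a-set is set(·) of the shared fold-into-a-list of labels
theorem setFold_eq_ofList (entries : List (List (String × Option String)))
    (acc : List String) :
    entries.foldl (fun s entry =>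
      match (PySem.Dict.get? (PySem.Dict.mk entry) "region").getD none with
      | none => s
      | some r =>
        if r = "" then s
        else PySem.Set.add s
          (PySem.Str.strip r ++ " (" ++
            derive_region_abbr r ((PySem.Dict.get? (PySem.Dict.mk entry) "region_abbr").getD none) ++ ")"))
      (PySem.Set.ofList acc)
    = PySem.Set.ofList (entries.foldl (fun acc entry =>
      match (PySem.Dict.get? (PySem.Dict.mk entry) "region").getD none with
      | none => acc
      | some r =>
        if r = "" then acc
        else acc ++
          [PySem.Str.strip r ++ " (" ++
            derive_region_abbr r ((PySem.Dict.get? (PySem.Dict.mk entry) "region_abbr").getD none) ++ ")"])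
      acc) := by
  induction entries generalizing acc with
  | nil => rfl
  | cons e t ih =>
    simp only [List.foldl_cons]
    rcases h : (PySem.Dict.get? (PySem.Dict.mk e) "region").getD none with _ | r
    · exact ih acc
    · by_cases hr : r = ""
      · simp only [hr]; exact ih acc
      · simp only [if_neg hr]
        rw [show PySem.Set.add (PySem.Set.ofList acc) _ = PySem.Set.ofList (acc ++ [_]) from ?_]
        · exact ih _
        · rw [PySem.Set.ofList_append]; rfl

-- invariant carried by the inner minimum scan over the labels seen so far
def MinInv (prev : Option String) (seen : List String) : Option String → Prop
  | none => ∀ x ∈ seen, pvAbove prev x = false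
  | some m => m ∈ seen ∧ pvAbove prev m = true ∧
      ∀ x ∈ seen, pvAbove prev x = true → m ≤ x

theorem minFold_inv (prev : Option String) :
    ∀ (labels seen : List String) (acc : Option String), MinInv prev seen acc →
    MinInv prev (seen ++ labels)
      (labels.foldl (fun nxt lab =>
        if pvAbove prev lab && nxt.all (fun n => decide (lab < n)) then some lab else nxt) acc) := by
  intro labels
  induction labels with
  | nil => intro seen acc h; simpa using h
  | cons lab t ih =>
    intro seen acc h
    simp only [List.foldl_cons]
    have hstep : MinInv prev (seen ++ [lab])
        (if pvAbove prev lab && acc.all (fun n => decide (lab < n)) then some lab else acc) := by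
      by_cases hc : (pvAbove prev lab && acc.all (fun n => decide (lab < n))) = true
      · rw [if_pos hc]
        obtain ⟨h1, h2⟩ := Bool.and_eq_true_iff.mp hc
        refine ⟨by simp, h1, ?_⟩
        intro x hx habx
        rcases List.mem_append.mp hx with hx | hx
        · cases acc with
          | none => exact absurd habx (by simpa using (h x hx))
          | some a =>
            have hla : lab < a := by
              simpa only [Option.all_some, decide_eq_true_eq] using h2
            exact le_trans (le_of_lt hla) (h.2.2 x hx habx)
        · simp only [List.mem_singleton] at hx; exact hx ▸ le_refl _
      · rw [if_neg hc]
        cases acc with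
        | none =>
          have hfalse : pvAbove prev lab = false := by
            cases hab : pvAbove prev lab with
            | false => rfl
            | true => exact absurd (by simp [hab]) hc
          intro x hx
          rcases List.mem_append.mp hx with hx | hx
          · exact h x hx
          · simp only [List.mem_singleton] at hx; exact hx ▸ hfalse
        | some a =>
          obtain ⟨hmem, hab, hmin⟩ := h
          refine ⟨List.mem_append.mpr (Or.inl hmem), hab, ?_⟩
          intro x hx habx
          rcases List.mem_append.mp hx with hx | hx
          · exact hmin x hx habx
          · simp only [List.mem_singleton] at hx
            subst hx
            have hnl : ¬ (x < a) := fun hlt => hc (by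
              simp only [habx, Option.all_some, Bool.true_and, decide_eq_true_eq]; exact hlt)
            exact le_of_not_gt hnl
    have := ih (seen ++ [lab]) _ hstep
    simpa using this

theorem pvMinAbove_inv (labels : List String) (prev : Option String) :
    MinInv prev labels (pvMinAbove labels prev) := by
  have := minFold_inv prev labels [] none (by intro x hx; cases hx)
  simpa [pvMinAbove] using this

-- the extraction loop returns a strictly increasing list whose members are
-- exactly the labels above prev (given enough fuel)
theorem pvExtract_spec (labels : List String) :
    ∀ (fuel : Nat) (prev : Option String),
    (labels.filter (pvAbove prev)).toFinset.card ≤ fuel →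
    (pvExtract labels prev fuel).Pairwise (· < ·) ∧
    (∀ a, a ∈ pvExtract labels prev fuel ↔ a ∈ labels ∧ pvAbove prev a = true) := by
  intro fuel
  induction fuel with
  | zero =>
    intro prev hcard
    have hempty : (labels.filter (pvAbove prev)).toFinset = ∅ :=
      Finset.card_eq_zero.mp (Nat.le_zero.mp hcard)
    refine ⟨by simp [pvExtract], ?_⟩
    intro a
    simp only [pvExtract, List.not_mem_nil, false_iff]
    rintro ⟨hl, hab⟩
    have : a ∈ (labels.filter (pvAbove prev)).toFinset :=
      List.mem_toFinset.mpr (List.mem_filter.mpr ⟨hl, hab⟩)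
    simp [hempty] at this
  | succ fuel ih =>
    intro prev hcard
    have hinv := pvMinAbove_inv labels prev
    rcases ho : pvMinAbove labels prev with _ | m
    · rw [ho] at hinv
      refine ⟨by simp [pvExtract, ho], ?_⟩
      intro a
      simp only [pvExtract, ho, List.not_mem_nil, false_iff]
      rintro ⟨hl, hab⟩
      exact absurd hab (by simp [hinv a hl])
    · rw [ho] at hinv
      obtain ⟨hm, habm, hmin⟩ := hinv
      have hsub : (labels.filter (pvAbove (some m))).toFinset ⊆
          ((labels.filter (pvAbove prev)).toFinset).erase m := by
        intro x hx
        obtain ⟨hxl, hxab⟩ := List.mem_filter.mp (List.mem_toFinset.mp hx)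
        have hmx : m < x := by
          simpa only [pvAbove, Option.all_some, decide_eq_true_eq] using hxab
        have hxprev : pvAbove prev x = true := by
          cases prev with
          | none => rfl
          | some p =>
            have hpm : p < m := by
              simpa only [pvAbove, Option.all_some, decide_eq_true_eq] using habm
            simp only [pvAbove, Option.all_some, decide_eq_true_eq]
            exact lt_trans hpm hmx
        exact Finset.mem_erase.mpr ⟨ne_of_gt hmx,
          List.mem_toFinset.mpr (List.mem_filter.mpr ⟨hxl, hxprev⟩)⟩
      have hmmem : m ∈ (labels.filter (pvAbove prev)).toFinset :=
        List.mem_toFinset.mpr (List.mem_filter.mpr ⟨hm, habm⟩)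
      have hcard' : (labels.filter (pvAbove (some m))).toFinset.card ≤ fuel := by
        have h1 := Finset.card_le_card hsub
        rw [Finset.card_erase_of_mem hmmem] at h1
        omega
      obtain ⟨hpw, hmem⟩ := ih (some m) hcard'
      refine ⟨?_, ?_⟩
      · simp only [pvExtract, ho]
        refine List.pairwise_cons.mpr ⟨?_, hpw⟩
        intro a ha
        have := (hmem a).mp ha
        simpa only [pvAbove, Option.all_some, decide_eq_true_eq] using this.2
      · intro a
        simp only [pvExtract, ho, List.mem_cons, hmem]
        constructor
        · rintro (rfl | ⟨hl, hab⟩)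
          · exact ⟨hm, habm⟩
          · refine ⟨hl, ?_⟩
            cases prev with
            | none => rfl
            | some p =>
              have hpm : p < m := by
                simpa only [pvAbove, Option.all_some, decide_eq_true_eq] using habm
              have hma : m < a := by
                simpa only [pvAbove, Option.all_some, decide_eq_true_eq] using hab
              simp only [pvAbove, Option.all_some, decide_eq_true_eq]
              exact lt_trans hpm hma
        · rintro ⟨hl, hab⟩
          rcases eq_or_lt_of_le (hmin a hl hab) with h | h
          · exact Or.inl h.symm
          · refine Or.inr ⟨hl, ?_⟩
            simp only [pvAbove, Option.all_some, decide_eq_true_eq]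
            exact h

-- ===== VERDICT (by name: the statement is the Claim_ definition above) =====
theorem summarize_region_abbrs_spec : Claim_equal_summarize_region_abbrs := by
  intro entries _
  unfold Spec_summarize_region_abbrs summarize_region_abbrs summarize_region_abbrs_alt
  have hset := setFold_eq_ofList entries []
  rw [show PySem.Set.ofList ([] : List String) = PySem.Set.empty from rfl] at hset
  rw [hset]
  generalize hL : entries.foldl (fun acc entry =>
      match (PySem.Dict.get? (PySem.Dict.mk entry) "region").getD none with
      | none => acc
      | some r =>
        if r = "" then acc
        else acc ++
          [PySem.Str.strip r ++ " (" ++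
            derive_region_abbr r ((PySem.Dict.get? (PySem.Dict.mk entry) "region_abbr").getD none) ++ ")"])
      [] = L
  by_cases hLnil : L = []
  · rw [hLnil]; rfl
  · have hSne : PySem.Set.ofList L ≠ [] := by
      rcases List.exists_mem_of_ne_nil L hLnil with ⟨x, hx⟩
      exact List.ne_nil_of_mem ((PySem.Set.mem_ofList _ _).mpr hx)
    rw [if_neg hSne, if_neg hLnil]
    have hcard0 : (L.filter (pvAbove none)).toFinset.card ≤ L.length := by
      have : L.filter (pvAbove none) = L := List.filter_eq_self.mpr (by intro x _; rfl)
      rw [this]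
      exact List.toFinset_card_le L
    obtain ⟨hpw, hmem⟩ := pvExtract_spec L L.length none hcard0
    have hmem' : ∀ a, a ∈ pvExtract L none L.length ↔ a ∈ PySem.Set.ofList L := by
      intro a
      rw [hmem a, PySem.Set.mem_ofList]
      simp [pvAbove]
    have hperm : (pvExtract L none L.length).Perm (PySem.Set.ofList L) := by
      refine (List.perm_ext_iff_of_nodup ?_ ?_).mpr hmem'
      · exact List.Pairwise.imp (fun h => ne_of_lt h) hpw
      · exact PySem.Set.nodup_ofList _
    exact congrArg (PySem.Str.join ", ")
      (PySem.List.sorted_eq_of_perm_of_pairwise_lt _ _ (fun x => x) hperm hpw)
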